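-- pv_equiv track=rewrite | github.com/myboyuan/fdslight | freenet/lib/utils.py | calc_net_prefix_num
-- ===== SOURCE A (Python) =====
-- def calc_net_prefix_num(prefix, is_ipv6=False):
--     """根据前缀计算网络掩码"""
--     if is_ipv6:
--         m = 128
--         n = 2 ** 128 - 1
--     else:
--         m = 32
--         n = 2 ** 32 - 1
--
--     r = 0
--     t = m - prefix
--
--     while t > 0:
--         t = t - 1
--         r |= 1 << t
--
--     return (~r) & n
-- ===== SOURCE B (Python) =====
-- def calc_net_prefix_num(prefix, is_ipv6=False):
--     """根据前缀计算网络掩码"""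
--     if is_ipv6:
--         m = 128
--         n = (1 << 128) - 1
--     else:
--         m = 32
--         n = (1 << 32) - 1
--     t = m - prefix
--     if t <= 0:
--         return n
--     return ~((1 << t) - 1) & n
-- ===== Notes on version B (the rewrite author's own statement) =====
-- stated objective: simpler
-- what changed: Replaces the bit-by-bit while loop with a closed-form mask expression ~((1 << t) - 1) & n, returning n directly when prefix >= m.
import Mathlib
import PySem

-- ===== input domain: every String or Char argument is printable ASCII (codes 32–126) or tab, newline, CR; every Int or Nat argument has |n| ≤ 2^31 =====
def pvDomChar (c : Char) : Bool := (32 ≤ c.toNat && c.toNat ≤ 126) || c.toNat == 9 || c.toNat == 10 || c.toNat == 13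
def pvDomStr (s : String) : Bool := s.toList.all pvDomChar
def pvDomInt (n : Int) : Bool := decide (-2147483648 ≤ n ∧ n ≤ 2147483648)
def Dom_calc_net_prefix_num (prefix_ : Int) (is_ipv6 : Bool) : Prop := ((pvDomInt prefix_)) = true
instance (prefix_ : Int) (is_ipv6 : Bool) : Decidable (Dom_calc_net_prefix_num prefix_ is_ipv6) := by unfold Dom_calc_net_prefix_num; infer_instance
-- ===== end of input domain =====

-- B replaces A's bit-by-bit while loop by a closed-form mask expression (simpler decomposition, same values).


-- ===== PORT A =====
-- the while loop `while t > 0: t = t - 1; r |= 1 << t` (Int.lor/Int.shiftLeft are Python's |, <<;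
-- the shift amount t - 1 is nonnegative inside the loop, so `.toNat` is exact here)
def pvLoopA (t r : Int) : Int :=
  if t > 0 then pvLoopA (t - 1) (Int.lor r (Int.shiftLeft 1 (t - 1).toNat)) else r
termination_by t.toNat
decreasing_by omega

def calc_net_prefix_num (prefix_ : Int) (is_ipv6 : Bool) : Int :=
  let m : Int := if is_ipv6 then 128 else 32
  let n : Int := if is_ipv6 then 2 ^ 128 - 1 else 2 ^ 32 - 1
  let t : Int := m - prefix_
  Int.land (Int.lnot (pvLoopA t 0)) n   -- (~r) & n

-- ===== PORT B =====
-- closed form: n for prefix ≥ m, otherwise ~((1 << t) - 1) & n (t > 0, so `.toNat` is exact)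
def calc_net_prefix_num_alt (prefix_ : Int) (is_ipv6 : Bool) : Int :=
  let m : Int := if is_ipv6 then 128 else 32
  let n : Int := if is_ipv6 then Int.shiftLeft 1 128 - 1 else Int.shiftLeft 1 32 - 1
  let t : Int := m - prefix_
  if t ≤ 0 then n else Int.land (Int.lnot (Int.shiftLeft 1 t.toNat - 1)) n

-- ===== PRECONDITION & SPEC =====
def Spec_calc_net_prefix_num (prefix_ : Int) (is_ipv6 : Bool) (out : Int) : Prop := out = calc_net_prefix_num_alt prefix_ is_ipv6
instance (prefix_ : Int) (is_ipv6 : Bool) (out : Int) : Decidable (Spec_calc_net_prefix_num prefix_ is_ipv6 out) := by unfold Spec_calc_net_prefix_num; infer_instance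

-- ===== CLAIM (what is proved, stated in full; the proofs are below) =====
def Claim_equal_calc_net_prefix_num : Prop := ∀ (prefix_ : Int) (is_ipv6 : Bool), Dom_calc_net_prefix_num prefix_ is_ipv6 → Spec_calc_net_prefix_num prefix_ is_ipv6 (calc_net_prefix_num prefix_ is_ipv6)

-- ===== LEMMAS AND PROOFS =====

-- ~0 is all ones, so (~0) & n = n
lemma lnot_zero_land (n : Int) : Int.land (Int.lnot 0) n = n := by
  have h : Int.lnot 0 = Int.negSucc 0 := rfl
  rw [h]
  cases n with
  | ofNat m => show ((Nat.ldiff m 0 : Nat) : Int) = _; simp [Nat.ldiff]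
  | negSucc m => show Int.negSucc (0 ||| m) = _; simp

lemma int_shiftLeft_one (k : Nat) : Int.shiftLeft 1 k = 2 ^ k := by
  show ((1 <<< k : Nat) : Int) = _
  simp [Nat.shiftLeft_eq]

lemma int_lor_natCast (r k : Nat) : Int.lor (r : Int) (k : Int) = ((r ||| k : Nat) : Int) := by
  simp [Int.lor]

-- Nat-level: OR-ing bit k into the low-k mask gives the low-(k+1) mask, under any r
lemma nat_or_pow_mask (r k : Nat) : (r ||| 2 ^ k) ||| (2 ^ k - 1) = r ||| (2 ^ (k + 1) - 1) := by
  apply Nat.eq_of_testBit_eq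
  intro i
  have h1 : (i < k + 1) ↔ (k = i ∨ i < k) := by omega
  simp only [Nat.testBit_or, Nat.testBit_two_pow, Nat.testBit_two_pow_sub_one, h1]
  by_cases h2 : k = i <;> by_cases h3 : i < k <;> simp [h2, h3]

lemma pvLoopA_eq (k r : Nat) : pvLoopA (k : Int) (r : Int) = ((r ||| (2 ^ k - 1) : Nat) : Int) := by
  induction k generalizing r with
  | zero => simp [pvLoopA]
  | succ k ih =>
    rw [pvLoopA]
    have h2 : (0 : Int) < (k : Int) + 1 := by positivity
    have h1 : ((k : Int) + 1) - 1 = (k : Int) := by ring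
    simp only [Nat.cast_succ, if_pos h2, h1, Int.toNat_natCast, int_shiftLeft_one]
    have hc : (2 : Int) ^ k = ((2 ^ k : Nat) : Int) := by push_cast; ring
    rw [hc, int_lor_natCast, ih, nat_or_pow_mask]

lemma pvLoopA_pos (t : Int) (ht : 0 < t) : pvLoopA t 0 = 2 ^ t.toNat - 1 := by
  obtain ⟨k, hk⟩ : ∃ k : Nat, t = (k : Int) := ⟨t.toNat, by omega⟩
  subst hk
  rw [show ((0:Int)) = ((0:Nat):Int) from rfl, pvLoopA_eq]
  have hp : 1 ≤ 2 ^ k := Nat.one_le_two_pow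
  have hc : ((0 ||| (2 ^ k - 1) : Nat) : Int) = ((2 ^ k : Nat) : Int) - 1 := by
    rw [Nat.zero_or]; omega
  rw [hc, Int.toNat_natCast]
  push_cast
  ring

lemma main_branch (m : Int) (n : Nat) (prefix_ : Int) :
    Int.land (Int.lnot (pvLoopA (m - prefix_) 0)) (2 ^ n - 1) =
      (if m - prefix_ ≤ 0 then Int.shiftLeft 1 n - 1
       else Int.land (Int.lnot (Int.shiftLeft 1 (m - prefix_).toNat - 1)) (Int.shiftLeft 1 n - 1)) := by
  rw [int_shiftLeft_one]
  have hpow : Int.shiftLeft 1 n - 1 = 2 ^ n - 1 := by rw [int_shiftLeft_one]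
  by_cases h : m - prefix_ ≤ 0
  · rw [if_pos h, pvLoopA, if_neg (by omega)]
    exact lnot_zero_land _
  · rw [if_neg h, pvLoopA_pos _ (by omega), int_shiftLeft_one]

-- ===== VERDICT (by name: the statement is the Claim_ definition above) =====
theorem calc_net_prefix_num_spec : Claim_equal_calc_net_prefix_num := by
  intro prefix_ is_ipv6 _
  unfold Spec_calc_net_prefix_num calc_net_prefix_num calc_net_prefix_num_alt
  cases is_ipv6 <;> simp only [Bool.false_eq_true, if_true, if_false]
  · exact main_branch 32 32 prefix_
  · exact main_branch 128 128 prefix_
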